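-- pv_equiv track=rewrite | github.com/steeplejack/adventofcode | 2023/day12/solution_python/part1.py | firstblockcount
-- ===== SOURCE A (Python) =====
-- def firstblockcount(s, char='#'):
--     y = 0
--     for c in s:
--         if c == char:
--             y += 1
--         else:
--             if y > 0:
--                 return y
--     return y
-- ===== SOURCE B (Python) =====
-- def firstblockcount(s, char='#'):
--     i = s.find(char)
--     if i == -1:
--         return 0
--     n = 0
--     for c in s[i:]:
--         if c != char:
--             break
--         n += 1
--     return n
-- ===== Notes on version B (the rewrite author's own statement) =====
-- stated objective: idiomatic
-- what changed: A's single stateful scan with an accumulator and early return is replaced by s.find(char) to locate the first occurrence, then counting only the consecutive run from that index.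
import Mathlib
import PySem

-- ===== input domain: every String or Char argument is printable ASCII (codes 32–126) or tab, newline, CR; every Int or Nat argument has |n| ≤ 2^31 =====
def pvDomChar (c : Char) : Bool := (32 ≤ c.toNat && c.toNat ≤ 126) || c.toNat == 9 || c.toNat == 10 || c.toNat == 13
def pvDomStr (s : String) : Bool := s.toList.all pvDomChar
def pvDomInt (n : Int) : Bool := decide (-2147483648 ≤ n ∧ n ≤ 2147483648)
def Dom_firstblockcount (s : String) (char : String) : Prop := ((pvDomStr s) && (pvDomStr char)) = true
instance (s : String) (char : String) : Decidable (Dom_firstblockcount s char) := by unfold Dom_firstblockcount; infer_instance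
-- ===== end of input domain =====

-- B replaces A's single stateful scan (skip-then-count with early return) by s.find(char)
-- to locate the run, then counting only the run itself — a simpler/idiomatic decomposition.

-- ===== PORT A =====
-- the for-loop of A: y is the accumulator, early 'return y' modelled by stopping the recursion
def pvGoA (char : String) : List Char → Int → Int
  | [], y => y
  | c :: cs, y =>
      if String.ofList [c] = char then pvGoA char cs (y + 1)
      else if y > 0 then y else pvGoA char cs y

def firstblockcount (s : String) (char : String) : Int := pvGoA char s.toList 0

-- ===== PORT B =====
-- the for-loop of B over s[i:]: counts while chars equal char, 'break' stops the recursion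
def pvGoB (char : String) : List Char → Int → Int
  | [], n => n
  | c :: cs, n =>
      if String.ofList [c] ≠ char then n else pvGoB char cs (n + 1)

def firstblockcount_alt (s : String) (char : String) : Int :=
  let i := PySem.Str.find s char
  if i = -1 then 0
  else pvGoB char (PySem.Str.slice s (some i) none).toList 0

-- ===== PRECONDITION & SPEC =====
def Spec_firstblockcount (s : String) (char : String) (out : Int) : Prop := out = firstblockcount_alt s char
instance (s : String) (char : String) (out : Int) : Decidable (Spec_firstblockcount s char out) := by unfold Spec_firstblockcount; infer_instance

-- ===== CLAIM (what is proved, stated in full; the proofs are below) =====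
def Claim_equal_firstblockcount : Prop := ∀ (s : String) (char : String), Dom_firstblockcount s char → Spec_firstblockcount s char (firstblockcount s char)

-- ===== LEMMAS AND PROOFS =====

theorem pv_mk_eq_iff (c : Char) (ch : String) : (String.ofList [c] = ch) ↔ ch.toList = [c] := by
  constructor
  · intro h; rw [← h]; simp
  · intro h; have := congrArg String.ofList h; simpa using this.symm

-- A skips characters that do not match (while y = 0)
theorem pvGoA_skip (char : String) (l₁ l₂ : List Char)
    (h : ∀ c ∈ l₁, String.ofList [c] ≠ char) :
    pvGoA char (l₁ ++ l₂) 0 = pvGoA char l₂ 0 := by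
  induction l₁ with
  | nil => rfl
  | cons c cs ih =>
      have hc := h c (by simp)
      simp only [List.cons_append, pvGoA, if_neg hc]
      norm_num
      exact ih (fun d hd => h d (by simp [hd]))

theorem pvGoA_nomatch (char : String) (l : List Char)
    (h : ∀ c ∈ l, String.ofList [c] ≠ char) : pvGoA char l 0 = 0 := by
  have := pvGoA_skip char l [] h
  simpa using this

-- once y > 0, A's loop body is exactly B's counting loop
theorem pvGoA_eq_goB (char : String) (l : List Char) :
    ∀ y : Int, 0 < y → pvGoA char l y = pvGoB char l y := by
  induction l with
  | nil => intro y _; rfl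
  | cons c cs ih =>
      intro y hy
      by_cases hc : String.ofList [c] = char
      · simp only [pvGoA, pvGoB]
        rw [if_pos hc, if_neg (not_not_intro hc)]
        exact ih (y + 1) (by omega)
      · simp only [pvGoA, pvGoB]
        rw [if_neg hc, if_pos hc, if_pos hy]

theorem firstblockcount_main (s char : String) :
    firstblockcount s char = firstblockcount_alt s char := by
  unfold firstblockcount firstblockcount_alt
  by_cases hneg : PySem.Str.find s char = -1
  · -- char is not a substring of s: in particular no single char of s equals char
    rw [if_pos hneg]
    have hnin : ¬ char.toList <:+: s.toList := (PySem.Str.find_eq_neg_one_iff s char).mp hneg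
    apply pvGoA_nomatch
    intro c hc heq
    apply hnin
    rw [(pv_mk_eq_iff c char).mp heq]
    obtain ⟨l₁, l₂, hs⟩ := List.append_of_mem hc
    exact ⟨l₁, l₂, by rw [hs]; simp⟩
  · rw [if_neg hneg]
    have hfind : PySem.Str.find s char = PySem.Chars.find s.toList char.toList :=
      PySem.Str.find_eq s char
    have h0 : 0 ≤ PySem.Chars.find s.toList char.toList := by
      rw [hfind] at hneg
      have := PySem.Chars.neg_one_le_find s.toList char.toList
      omega
    set i : Nat := (PySem.Chars.find s.toList char.toList).toNat with hi
    obtain ⟨hpre, hmin⟩ := PySem.Chars.find_spec h0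
    have hslice : (PySem.Str.slice s (some (PySem.Str.find s char)) none).toList
        = s.toList.drop i := by
      rw [PySem.Str.toList_slice, PySem.Chars.slice_eq_listSlice, hfind]
      exact PySem.List.slice_from _ h0
    rw [hslice]
    have hilen : i ≤ s.toList.length := by
      have := PySem.Chars.find_le_length s.toList char.toList
      omega
    obtain ⟨t, ht⟩ := hpre
    rw [← hi] at ht
    match hch : char.toList with
    | [] =>
        -- char = "": find = 0, neither loop ever matches, both sides are 0
        have hi0 : i = 0 := by rw [hi, hch, PySem.Chars.find_nil]; rfl
        rw [hi0, List.drop_zero]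
        have hnm : ∀ c ∈ s.toList, String.ofList [c] ≠ char := by
          intro c _ heq
          have h1 := (pv_mk_eq_iff c char).mp heq
          rw [hch] at h1; exact (List.cons_ne_nil _ _) h1.symm
        rw [pvGoA_nomatch char s.toList hnm]
        cases hs : s.toList with
        | nil => rfl
        | cons c cs =>
            simp only [pvGoB]
            rw [if_pos]
            intro heq
            have h1 := (pv_mk_eq_iff c char).mp heq
            rw [hch] at h1; exact (List.cons_ne_nil _ _) h1.symm
    | a :: bs =>
        rw [hch] at ht
        have hdrop : s.toList.drop i = a :: (bs ++ t) := by rw [← ht]; simp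
        cases hbs : bs with
        | nil =>
            -- char is a single character a: skip take i (no a there), then count
            subst hbs
            have hmatch : String.ofList [a] = char := (pv_mk_eq_iff a char).mpr hch
            have hskip : ∀ c ∈ s.toList.take i, String.ofList [c] ≠ char := by
              intro c hc heq
              have hcl : char.toList = [c] := (pv_mk_eq_iff c char).mp heq
              have hca : c = a := by rw [hch] at hcl; injection hcl with h1 _; exact h1.symm
              subst hca
              obtain ⟨j, hj, hgetc⟩ := List.mem_take_iff_getElem.mp hc
              have hji : j < i := by omega
              refine hmin j hji ?_
              rw [hch]
              have hjlen : j < s.toList.length := by omega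
              refine ⟨s.toList.drop (j + 1), ?_⟩
              rw [List.drop_eq_getElem_cons hjlen]
              simp [hgetc]
            calc pvGoA char s.toList 0
                = pvGoA char (s.toList.take i ++ s.toList.drop i) 0 := by
                  rw [List.take_append_drop]
              _ = pvGoA char (s.toList.drop i) 0 := pvGoA_skip char _ _ hskip
              _ = pvGoB char (s.toList.drop i) 0 := by
                  rw [hdrop]
                  simp only [pvGoA, pvGoB]
                  rw [if_pos hmatch, if_neg (not_not_intro hmatch)]
                  exact pvGoA_eq_goB char _ 1 (by omega)
        | cons b bs' =>
            -- char has length ≥ 2: no single character equals it, both sides are 0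
            have hnm : ∀ c, String.ofList [c] ≠ char := by
              intro c heq
              have hcl := (pv_mk_eq_iff c char).mp heq
              rw [hch, hbs] at hcl
              simp at hcl
            rw [pvGoA_nomatch char s.toList (fun c _ => hnm c), hdrop]
            simp only [pvGoB]
            rw [if_pos (hnm a)]

-- ===== VERDICT (by name: the statement is the Claim_ definition above) =====
theorem firstblockcount_spec : Claim_equal_firstblockcount := by
  intro s char _
  exact firstblockcount_main s char
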